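-- pv_equiv track=rewrite | github.com/dpernes/spamhmm | utils/wifi_data_utils.py | get_X_y_from_data
-- ===== SOURCE A (Python) =====
-- def get_X_y_from_data(data):
--   X = []
--   y = []
--   for ap, seq_list in enumerate(data):
--     for seq in seq_list:
--       y.append(ap)
--       X.append(seq)
--
--   return X, y
-- ===== SOURCE B (Python) =====
-- def get_X_y_from_data(data):
--   # recursive: consume the list head-first, build X and y back-to-front
--   # by prepending the current block ([seq_list] elements and ap repeated).
--   def go(ap, rest):
--     if not rest:
--       return [], []
--     seq_list = rest[0]
--     X, y = go(ap + 1, rest[1:])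
--     return list(seq_list) + X, [ap] * len(seq_list) + y
--   return go(0, data)
-- ===== Notes on version B (the rewrite author's own statement) =====
-- stated objective: alternative
-- what changed: Replaces A's iterative lockstep double-append loop with a recursion over the list of sub-lists that builds both results back-to-front, prepending each whole block (the sub-list and [ap]*len) to the recursively-built tails.
import Mathlib
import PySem

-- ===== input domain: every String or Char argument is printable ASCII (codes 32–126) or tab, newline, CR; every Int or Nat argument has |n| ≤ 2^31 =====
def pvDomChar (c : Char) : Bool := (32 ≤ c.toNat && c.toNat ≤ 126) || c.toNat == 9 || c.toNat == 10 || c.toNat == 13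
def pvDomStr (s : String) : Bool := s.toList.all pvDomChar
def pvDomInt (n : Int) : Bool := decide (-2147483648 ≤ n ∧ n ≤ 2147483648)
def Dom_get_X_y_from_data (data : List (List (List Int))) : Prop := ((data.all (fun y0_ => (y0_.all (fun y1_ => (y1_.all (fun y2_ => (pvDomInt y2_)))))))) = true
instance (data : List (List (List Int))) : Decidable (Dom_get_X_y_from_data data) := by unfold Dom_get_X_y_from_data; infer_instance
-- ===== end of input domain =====

-- B replaces A's iterative lockstep double-append loop with a recursion that builds both
-- results back-to-front, prepending each block ([seq_list] and [ap]*len) to the recursive tails.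

-- ===== PORT A =====
-- literal port of A: one nested loop appending to both X and y in lockstep
def get_X_y_from_data (data : List (List (List Int))) : List (List Int) × List Int :=
  (PySem.List.enumerate data 0).foldl
    (fun acc p =>
      p.2.foldl (fun (acc : List (List Int) × List Int) seq => (acc.1 ++ [seq], acc.2 ++ [p.1])) acc)
    ([], [])

-- ===== PORT B =====
-- literal port of B's inner 'go': recursion on the remaining list, prepending blocks
def get_X_y_go (ap : Int) : List (List (List Int)) → List (List Int) × List Int
  | [] => ([], [])
  | seq_list :: rest =>
      let Xy := get_X_y_go (ap + 1) rest
      (seq_list ++ Xy.1, List.replicate seq_list.length ap ++ Xy.2)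

def get_X_y_from_data_alt (data : List (List (List Int))) : List (List Int) × List Int :=
  get_X_y_go 0 data

-- ===== PRECONDITION & SPEC =====
def Spec_get_X_y_from_data (data : List (List (List Int))) (out : List (List Int) × List Int) : Prop := out = get_X_y_from_data_alt data
instance (data : List (List (List Int))) (out : List (List Int) × List Int) : Decidable (Spec_get_X_y_from_data data out) := by unfold Spec_get_X_y_from_data; infer_instance

-- ===== CLAIM =====
def Claim_equal_get_X_y_from_data : Prop := ∀ (data : List (List (List Int))), Dom_get_X_y_from_data data → Spec_get_X_y_from_data data (get_X_y_from_data data)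

-- ===== LEMMAS AND PROOFS =====

-- A's inner loop appends the sub-list's elements to X and |sub-list| copies of the index to y
lemma inner_loop (ap : Int) (seq_list : List (List Int)) (acc : List (List Int) × List Int) :
    seq_list.foldl (fun (acc : List (List Int) × List Int) seq => (acc.1 ++ [seq], acc.2 ++ [ap])) acc
      = (acc.1 ++ seq_list, acc.2 ++ List.replicate seq_list.length ap) := by
  induction seq_list generalizing acc with
  | nil => simp
  | cons h t ih => simp [List.foldl_cons, ih, List.replicate_succ]

-- A's outer loop, from any accumulator and start index, produces acc ++ B's recursion
lemma outer_loop (data : List (List (List Int))) (s : Int) (acc : List (List Int) × List Int) :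
    (PySem.List.enumerate data s).foldl
      (fun acc p =>
        p.2.foldl (fun (acc : List (List Int) × List Int) seq => (acc.1 ++ [seq], acc.2 ++ [p.1])) acc)
      acc
    = (acc.1 ++ (get_X_y_go s data).1, acc.2 ++ (get_X_y_go s data).2) := by
  induction data generalizing s acc with
  | nil => simp [PySem.List.enumerate_nil, get_X_y_go]
  | cons h t ih =>
    rw [PySem.List.enumerate_cons, List.foldl_cons, inner_loop, ih]
    simp [get_X_y_go]

-- ===== VERDICT =====
theorem get_X_y_from_data_spec : Claim_equal_get_X_y_from_data := by
  intro data _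
  show _ = _
  simp [get_X_y_from_data, get_X_y_from_data_alt, outer_loop]
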